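-- pv_equiv track=rewrite | github.com/dataronio/Bioinformatics-Intro | SymbolArray.py | SymbolArray
-- ===== SOURCE A (Python) =====
-- def SymbolArray(Genome, symbol):
--     def patterncount(Pattern, text):
--         # this is the patterncount for replication of DNA
--         count = 0
--         n = len(text)
--         k = len(Pattern)
--         for i in range(n-k+1):
--             if (text[i:i+k] == Pattern):
--                 count = count + 1
--         return count
--     array = {}
--     n = len(Genome)
--     ExtendedGenome = Genome + Genome[0:n//2]
--     for i in range(n):
--         array[i] = patterncount(symbol, ExtendedGenome[i:i+(n//2)])
--     return array
-- ===== SOURCE B (Python) =====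
-- def SymbolArray(Genome, symbol):
--     n = len(Genome)
--     h = n // 2
--     k = len(symbol)
--     E = Genome + Genome[:h]
--     # prefix sums of the match indicator: P[t] = number of j < t with E[j:j+k] == symbol
--     L = len(E) - k + 1
--     P = [0]
--     for j in range(max(0, L)):
--         P.append(P[-1] + (1 if E.startswith(symbol, j) else 0))
--     w = h - k + 1
--     return {i: (P[i + w] - P[i] if w > 0 else 0) for i in range(n)}
-- ===== Notes on version B (the rewrite author's own statement) =====
-- stated objective: faster
-- what changed: Replaces the per-position rescan (patterncount over every half-genome window) by one startswith marking pass over the doubled genome plus prefix sums of the matches, so each window count is a difference of two prefix sums.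
import Mathlib
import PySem

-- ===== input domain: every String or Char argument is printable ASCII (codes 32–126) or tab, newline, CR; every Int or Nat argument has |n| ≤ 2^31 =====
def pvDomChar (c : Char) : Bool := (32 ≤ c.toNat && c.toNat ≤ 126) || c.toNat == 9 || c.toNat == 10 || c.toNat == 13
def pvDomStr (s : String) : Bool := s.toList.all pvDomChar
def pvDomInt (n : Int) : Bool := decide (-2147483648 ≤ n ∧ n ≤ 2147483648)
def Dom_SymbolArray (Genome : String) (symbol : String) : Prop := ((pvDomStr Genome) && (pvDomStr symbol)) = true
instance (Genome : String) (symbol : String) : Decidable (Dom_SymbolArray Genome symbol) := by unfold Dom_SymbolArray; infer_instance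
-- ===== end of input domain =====

-- B replaces A's per-window rescan by one match-marking pass plus prefix sums; a timing run measured B faster.

-- ===== PORT A =====
-- inner helper 'patterncount' of A, transliterated
def pvPatterncount (Pattern : String) (text : String) : Int :=
  let n := PySem.Str.len text
  let k := PySem.Str.len Pattern
  (PySem.List.pyRange 0 (n - k + 1) 1).foldl
    (fun count i => if PySem.Str.slice text (some i) (some (i + k)) == Pattern then count + 1 else count) 0

def SymbolArray (Genome : String) (symbol : String) : List (Int × Int) :=
  let n := PySem.Str.len Genome
  let ExtendedGenome := Genome ++ PySem.Str.slice Genome (some 0) (some (PySem.Int.floordiv n 2))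
  ((PySem.List.pyRange 0 n 1).foldl
    (fun (array : PySem.Dict Int Int) i =>
      array.insert i (pvPatterncount symbol
        (PySem.Str.slice ExtendedGenome (some i) (some (i + PySem.Int.floordiv n 2)))))
    PySem.Dict.empty).items

-- ===== PORT B =====
-- hand port of str.startswith(sub, j): exact for 0 ≤ j ≤ len(s), the only offsets B uses
def pvStartsWith (s : String) (sub : String) (j : Int) : Bool :=
  decide (List.take sub.toList.length (List.drop j.toNat s.toList) = sub.toList)

def SymbolArray_alt (Genome : String) (symbol : String) : List (Int × Int) :=
  let n := PySem.Str.len Genome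
  let h := PySem.Int.floordiv n 2
  let k := PySem.Str.len symbol
  let E := Genome ++ PySem.Str.slice Genome none (some h)
  let L := PySem.Str.len E - k + 1
  let P := (PySem.List.pyRange 0 (max 0 L) 1).foldl
    (fun (P : List Int) j =>
      P ++ [PySem.List.pyGetD P (-1) 0 +
            (if pvStartsWith E symbol j then 1 else 0)]) [0]
  let w := h - k + 1
  -- the dict comprehension over range(n): keys are distinct, inserted in order
  (PySem.List.pyRange 0 n 1).map
    (fun i => (i, if w > 0 then PySem.List.pyGetD P (i + w) 0 - PySem.List.pyGetD P i 0 else 0))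

-- ===== PRECONDITION & SPEC =====
def Spec_SymbolArray (Genome : String) (symbol : String) (out : List (Int × Int)) : Prop := out = SymbolArray_alt Genome symbol
instance (Genome : String) (symbol : String) (out : List (Int × Int)) : Decidable (Spec_SymbolArray Genome symbol out) := by unfold Spec_SymbolArray; infer_instance

-- ===== CLAIM (what is proved, stated in full; the proofs are below) =====
def Claim_equal_SymbolArray : Prop := ∀ (Genome : String) (symbol : String), Dom_SymbolArray Genome symbol → Spec_SymbolArray Genome symbol (SymbolArray Genome symbol)

-- ===== LEMMAS AND PROOFS =====

-- match indicator at position j of e, and its prefix sums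
def pvInd (e p : List Char) (j : Nat) : Int := if (e.drop j).take p.length = p then 1 else 0

def pvPref (e p : List Char) (t : Nat) : Int := ((List.range t).map (pvInd e p)).sum

-- both programs compute this canonical table of window counts
def pvCanon (g p : List Char) : List (Int × Int) :=
  (List.range g.length).map (fun i : Nat => (((i : Nat) : Int),
    ((List.range (g.length / 2 + 1 - p.length)).map
      (fun j => pvInd (g ++ g.take (g.length / 2)) p (i + j))).sum))

theorem pvSliceBeq (text Pattern : String) (a b : Option Int) :
    (PySem.Str.slice text a b == Pattern) = decide (PySem.List.slice text.toList a b = Pattern.toList) := by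
  have h : (PySem.Str.slice text a b).toList = PySem.List.slice text.toList a b := by simp [pysem]
  by_cases hc : PySem.List.slice text.toList a b = Pattern.toList
  · simp [String.ext_iff, h, hc]
  · simp [String.ext_iff, h, hc]

theorem pvPatterncount_eq (Pattern text : String) :
    pvPatterncount Pattern text =
      ((List.range (text.toList.length + 1 - Pattern.toList.length)).map
        (fun j => if (text.toList.drop j).take Pattern.toList.length = Pattern.toList then (1:Int) else 0)).sum := by
  unfold pvPatterncount
  simp only [PySem.Str.len_eq]
  rw [PySem.List.pyRange_one, List.foldl_map]
  have hb : ((↑text.toList.length - ↑Pattern.toList.length + 1 - 0 : Int)).toNat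
      = text.toList.length + 1 - Pattern.toList.length := by omega
  rw [hb]
  simp only [pvSliceBeq, zero_add, PySem.List.slice_natCast_add]
  rw [PySem.List.foldl_if_add_one]
  rw [← PySem.List.sum_map_ite_one_zero (fun jN => decide (List.take Pattern.toList.length (List.drop jN text.toList) = Pattern.toList))]
  simp

-- A's dict loop with fresh keys appends its items in order
theorem pvItems_foldl_insert (l : List Int) (f : Int → Int) (d : PySem.Dict Int Int)
    (hn : l.Nodup) (hd : ∀ x ∈ l, d.contains x = false) :
    (l.foldl (fun d i => d.insert i (f i)) d).items = d.items ++ l.map (fun i => (i, f i)) := by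
  induction l generalizing d with
  | nil => simp
  | cons x t ih =>
      simp only [List.foldl_cons, List.map_cons]
      rw [ih _ (List.Nodup.of_cons hn) ?_]
      · rw [PySem.Dict.items_insert_of_not_contains _ _ (hd x (by simp))]
        simp
      · intro y hy
        rw [PySem.Dict.contains_insert]
        have hxy : y ≠ x := fun h => ((List.nodup_cons.mp hn).1) (h ▸ hy)
        simp [hxy, hd y (List.mem_cons_of_mem _ hy)]

theorem pvFloordivTwo (nN : Nat) : PySem.Int.floordiv (nN : Int) 2 = ((nN / 2 : Nat) : Int) := by
  rw [PySem.Int.floordiv_eq_ediv_of_pos (by omega)]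
  exact (Nat.ToInt.div_congr rfl rfl).symm

theorem pvPref_add (e p : List Char) (a b : Nat) :
    pvPref e p (a + b) = pvPref e p a + ((List.range b).map (fun j => pvInd e p (a + j))).sum := by
  simp [pvPref, List.range_add]
  rfl

-- B's prefix-sum loop builds the table of pvPref values
theorem pvPrefix_loop (c : Nat → Int) (l : Nat) :
    (List.range l).foldl (fun P j => P ++ [PySem.List.pyGetD P (-1) 0 + c j]) [0] =
      (List.range (l + 1)).map (fun t => ((List.range t).map c).sum) := by
  induction l with
  | zero => simp
  | succ m ih =>
      rw [List.range_succ, List.foldl_append, ih]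
      rw [List.range_succ (n := m + 1), List.map_append]
      rw [List.range_succ (n := m)]
      simp only [List.foldl_cons, List.foldl_nil, List.map_append, List.map_cons, List.map_nil]
      rw [PySem.List.pyGetD_neg_one_append_singleton]
      simp [List.range_succ]

theorem pvA_canon (G s : String) : SymbolArray G s = pvCanon G.toList s.toList := by
  unfold SymbolArray pvCanon
  simp only [PySem.Str.len_eq, pvFloordivTwo]
  have hEG : (G ++ PySem.Str.slice G (some 0) (some ((G.toList.length / 2 : Nat) : Int))).toList
      = G.toList ++ G.toList.take (G.toList.length / 2) := by
    simp only [String.toList_append]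
    congr 1
    have h1 : (PySem.Str.slice G (some 0) (some ((G.toList.length / 2 : Nat) : Int))).toList
        = PySem.List.slice G.toList (some 0) (some ((G.toList.length / 2 : Nat) : Int)) := by simp [pysem]
    rw [h1]
    simp only [PySem.List.slice_zero_start]
    rw [PySem.List.slice_to _ (by omega)]
    simp
    omega
  rw [pvItems_foldl_insert _ _ _ (PySem.List.nodup_pyRange_one 0 _) (by intro x hx; simp [pysem])]
  rw [PySem.List.pyRange_one]
  simp only [List.map_map, Int.sub_zero, Int.toNat_natCast]
  have hempty : (PySem.Dict.empty : PySem.Dict Int Int).items = [] := rfl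
  rw [hempty, List.nil_append]
  apply List.map_congr_left
  intro iN hiN
  rw [List.mem_range] at hiN
  simp only [Function.comp, zero_add]
  refine Prod.ext rfl ?_
  rw [pvPatterncount_eq]
  have hsl : (PySem.Str.slice (G ++ PySem.Str.slice G (some 0) (some ((G.toList.length / 2 : Nat) : Int))) (some (iN : Int)) (some ((iN : Int) + ((G.toList.length / 2 : Nat) : Int)))).toList
      = List.take (G.toList.length / 2) (List.drop iN (G.toList ++ G.toList.take (G.toList.length / 2))) := by
    have h1 : ∀ (W : String) (a b : Option Int), (PySem.Str.slice W a b).toList = PySem.List.slice W.toList a b := by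
      intro W a b; simp [pysem]
    rw [h1, hEG, PySem.List.slice_natCast_add]
  rw [hsl]
  have hlen : (List.take (G.toList.length / 2) (List.drop iN (G.toList ++ G.toList.take (G.toList.length / 2)))).length
      = G.toList.length / 2 := by
    simp [List.length_take, List.length_drop, String.length_toList] at hiN ⊢
    omega
  rw [hlen]
  refine congrArg List.sum (List.map_congr_left ?_)
  intro j hj
  rw [List.mem_range] at hj
  rw [List.drop_take, List.drop_drop, List.take_take]
  have hmin : min s.toList.length (G.toList.length / 2 - j) = s.toList.length := by omega
  rw [hmin]
  simp [pvInd]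

theorem pvB_canon (G s : String) : SymbolArray_alt G s = pvCanon G.toList s.toList := by
  unfold SymbolArray_alt pvCanon
  simp only [PySem.Str.len_eq, pvFloordivTwo]
  have hE : (G ++ PySem.Str.slice G none (some ((G.toList.length / 2 : Nat) : Int))).toList
      = G.toList ++ G.toList.take (G.toList.length / 2) := by
    simp only [String.toList_append]
    congr 1
    have h1 : (PySem.Str.slice G none (some ((G.toList.length / 2 : Nat) : Int))).toList
        = PySem.List.slice G.toList none (some ((G.toList.length / 2 : Nat) : Int)) := by simp [pysem]
    rw [h1, PySem.List.slice_to _ (by omega)]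
    simp
    omega
  have hlenE : (G ++ PySem.Str.slice G none (some ((G.toList.length / 2 : Nat) : Int))).toList.length
      = G.toList.length + G.toList.length / 2 := by
    rw [hE]
    simp [String.length_toList]
    omega
  rw [hlenE]
  have hmax : ((max 0 (((G.toList.length + G.toList.length / 2 : Nat) : Int) - (s.toList.length : Int) + 1) - 0 : Int)).toNat
      = G.toList.length + G.toList.length / 2 + 1 - s.toList.length := by omega
  rw [PySem.List.pyRange_one (a := 0) (b := max 0 _), hmax, List.foldl_map]
  simp only [pvStartsWith, hE, zero_add, Int.toNat_natCast, decide_eq_true_eq]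
  have hc : (fun jN : Nat => if List.take s.toList.length (List.drop jN (G.toList ++ List.take (G.toList.length / 2) G.toList)) = s.toList then (1:Int) else 0)
      = pvInd (G.toList ++ List.take (G.toList.length / 2) G.toList) s.toList := rfl
  rw [pvPrefix_loop]
  rw [PySem.List.pyRange_one (a := 0) (b := (G.toList.length : Int))]
  simp only [Int.sub_zero, Int.toNat_natCast, List.map_map]
  apply List.map_congr_left
  intro iN hiN
  rw [List.mem_range] at hiN
  simp only [Function.comp, zero_add]
  refine Prod.ext rfl ?_
  by_cases hk : s.toList.length ≤ G.toList.length / 2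
  · rw [if_pos (by push_cast; omega)]
    have hi1 : (iN : Int) + ((((G.toList.length / 2 : Nat)) : Int) - (s.toList.length : Int) + 1)
        = ((iN + (G.toList.length / 2 + 1 - s.toList.length) : Nat) : Int) := by push_cast [hk]; omega
    rw [hi1]
    rw [PySem.List.pyGetD_natCast, PySem.List.pyGetD_natCast]
    rw [PySem.List.getD_map_range _ _ _ _ (by omega), PySem.List.getD_map_range _ _ _ _ (by omega)]
    have hsplit := pvPref_add (G.toList ++ List.take (G.toList.length / 2) G.toList) s.toList iN (G.toList.length / 2 + 1 - s.toList.length)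
    simp only [pvPref] at hsplit
    simp only [hc]
    rw [hsplit]
    ring
  · rw [if_neg (by push_cast; omega)]
    have h0 : G.toList.length / 2 + 1 - s.toList.length = 0 := by omega
    rw [h0]
    simp

-- ===== VERDICT (by name: the statement is the Claim_ definition above) =====
theorem SymbolArray_spec : Claim_equal_SymbolArray := by
  intro G s _
  unfold Spec_SymbolArray
  rw [pvA_canon, pvB_canon]
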